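-- pv_equiv track=rewrite | github.com/AlexandrePoisson/ScrabbleML | src/scrabble/move_generator.py | _can_supply_from_rack
-- ===== SOURCE A (Python) =====
-- from collections import Counter, defaultdict
-- from typing import Dict, Iterable, List, Optional, Sequence, Set, Tuple
--
-- def _can_supply_from_rack(required: Iterable[str], rack: str) -> bool:
--     # rack may contain '?' representing a blank tile
--     rack_counts = Counter(rack.upper())
--     for ch in required:
--         if rack_counts[ch] > 0:
--             rack_counts[ch] -= 1
--         elif rack_counts['?'] > 0:
--             rack_counts['?'] -= 1
--         else:
--             return False
--     return True
-- ===== SOURCE B (Python) =====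
-- from collections import Counter
--
--
-- def _can_supply_from_rack(required, rack):
--     need = Counter(required)
--     have = Counter(rack.upper())
--     blanks_needed = need['?'] + sum(
--         max(0, cnt - have[ch]) for ch, cnt in need.items() if ch != '?')
--     return have['?'] >= blanks_needed
-- ===== Notes on version B (the rewrite author's own statement) =====
-- stated objective: simpler
-- what changed: Replaced A's early-exiting per-tile greedy loop that mutates a rack counter with a single aggregate comparison: blanks available vs. blanks needed (required '?' count plus per-letter shortfalls from Counter(required) against Counter(rack.upper())).
import Mathlib
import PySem

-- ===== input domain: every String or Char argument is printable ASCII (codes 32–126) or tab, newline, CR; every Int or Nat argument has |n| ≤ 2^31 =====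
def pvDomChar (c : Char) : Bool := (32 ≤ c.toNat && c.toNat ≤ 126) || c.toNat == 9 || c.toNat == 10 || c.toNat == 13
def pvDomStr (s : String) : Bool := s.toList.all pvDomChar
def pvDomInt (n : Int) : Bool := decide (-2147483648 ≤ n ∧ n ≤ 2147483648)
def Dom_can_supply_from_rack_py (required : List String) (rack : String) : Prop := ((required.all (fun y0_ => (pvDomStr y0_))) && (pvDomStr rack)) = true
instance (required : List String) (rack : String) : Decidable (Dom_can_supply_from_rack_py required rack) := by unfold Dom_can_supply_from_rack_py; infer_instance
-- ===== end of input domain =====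

-- B replaces A's early-exiting per-tile greedy loop by a single aggregate count-and-compare
-- (blanks available vs. blanks needed); objective: simpler.

-- ===== PORT A =====
-- iteration over the Python string rack.upper() yields 1-character strings (the Counter keys)
def pvRackKeys (rack : String) : List String :=
  (PySem.Str.upper rack).toList.map (fun c => String.ofList [c])

-- the for-loop of A: early return False, else the counter is threaded through
def pvSupplyLoop (d : PySem.Dict String Int) (req : List String) : Bool :=
  match req with
  | [] => true
  | ch :: rest =>
    if d.getD ch 0 > 0 then
      pvSupplyLoop (d.insert ch (d.getD ch 0 - 1)) rest
    else if d.getD "?" 0 > 0 then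
      pvSupplyLoop (d.insert "?" (d.getD "?" 0 - 1)) rest
    else
      false

def can_supply_from_rack_py (required : List String) (rack : String) : Bool :=
  pvSupplyLoop (PySem.Dict.counter (pvRackKeys rack)) required

-- ===== PORT B =====
def can_supply_from_rack_py_alt (required : List String) (rack : String) : Bool :=
  let need := PySem.Dict.counter required
  let haveC := PySem.Dict.counter (pvRackKeys rack)
  let blanksNeeded := need.getD "?" 0 +
    (((need.items.filter (fun p => p.1 != "?")).map
        (fun p => max 0 (p.2 - haveC.getD p.1 0))).sum)
  decide (haveC.getD "?" 0 ≥ blanksNeeded)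

-- ===== PRECONDITION & SPEC =====
def Spec_can_supply_from_rack_py (required : List String) (rack : String) (out : Bool) : Prop := out = can_supply_from_rack_py_alt required rack
instance (required : List String) (rack : String) (out : Bool) : Decidable (Spec_can_supply_from_rack_py required rack out) := by unfold Spec_can_supply_from_rack_py; infer_instance

-- ===== CLAIM (what is proved, stated in full; the proofs are below) =====
def Claim_equal_can_supply_from_rack_py : Prop := ∀ (required : List String) (rack : String), Dom_can_supply_from_rack_py required rack → Spec_can_supply_from_rack_py required rack (can_supply_from_rack_py required rack)

-- ===== LEMMAS AND PROOFS =====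

-- the mathematical "number of blanks needed" for a demand list req against supply g
def pvNeed (g : String → Int) (req : List String) : Int :=
  (req.count "?" : Int) + ∑ k ∈ req.toFinset.erase "?", max 0 ((req.count k : Int) - g k)

theorem pvNeed_nonneg (g : String → Int) (req : List String) : 0 ≤ pvNeed g req := by
  unfold pvNeed
  have h1 : (0:Int) ≤ (req.count "?" : Int) := Int.natCast_nonneg _
  have h2 : (0:Int) ≤ ∑ k ∈ req.toFinset.erase "?", max 0 ((req.count k : Int) - g k) :=
    Finset.sum_nonneg (fun k _ => le_max_left 0 _)
  omega

-- pvNeed never reads g at "?"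
theorem pvNeed_congr (g g' : String → Int) (req : List String)
    (h : ∀ s, s ≠ "?" → g s = g' s) : pvNeed g req = pvNeed g' req := by
  unfold pvNeed
  congr 1
  refine Finset.sum_congr rfl (fun k hk => ?_)
  rw [h k (Finset.ne_of_mem_erase hk)]

theorem pvNeed_cons_blank (g : String → Int) (req : List String) :
    pvNeed g ("?" :: req) = 1 + pvNeed g req := by
  unfold pvNeed
  rw [List.count_cons_self, List.toFinset_cons, Finset.erase_insert_eq_erase]
  have hs : ∀ k ∈ req.toFinset.erase "?",
      max 0 ((List.count k ("?" :: req) : Int) - g k) = max 0 ((req.count k : Int) - g k) := by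
    intro k hk
    rw [List.count_cons_of_ne (Ne.symm (Finset.ne_of_mem_erase hk))]
  rw [Finset.sum_congr rfl hs]
  push_cast
  ring

theorem pvNeed_cons_hit (g : String → Int) (r : String) (req : List String)
    (hr : r ≠ "?") (hg : 0 < g r) :
    pvNeed g (r :: req) = pvNeed (fun s => if s = r then g r - 1 else g s) req := by
  unfold pvNeed
  rw [List.toFinset_cons, Finset.erase_insert_of_ne hr]
  have hcq : List.count "?" (r :: req) = req.count "?" := List.count_cons_of_ne hr
  rw [hcq]
  congr 1
  by_cases hmem : r ∈ req
  · have habs : insert r (req.toFinset.erase "?") = req.toFinset.erase "?" :=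
      Finset.insert_eq_self.mpr (Finset.mem_erase.mpr ⟨hr, List.mem_toFinset.mpr hmem⟩)
    rw [habs]
    refine Finset.sum_congr rfl (fun k hk => ?_)
    by_cases hkr : k = r
    · subst hkr
      have hb : (fun s => if s = k then g k - 1 else g s) k = g k - 1 := by simp
      rw [List.count_cons_self, hb]
      congr 1
      push_cast; ring
    · have hb : (fun s => if s = r then g r - 1 else g s) k = g k := by simp [hkr]
      rw [List.count_cons_of_ne (fun h => hkr h.symm), hb]
  · have hnot : r ∉ req.toFinset.erase "?" := by
      simp [Finset.mem_erase, List.mem_toFinset, hmem]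
    rw [Finset.sum_insert hnot]
    have hc0 : req.count r = 0 := List.count_eq_zero_of_not_mem hmem
    have hterm : max 0 ((List.count r (r :: req) : Int) - g r) = 0 := by
      rw [List.count_cons_self, hc0]
      have : (((0:Nat) + 1 : Nat) : Int) - g r ≤ 0 := by push_cast; omega
      omega
    rw [hterm, zero_add]
    refine Finset.sum_congr rfl (fun k hk => ?_)
    have hkreq : k ∈ req := List.mem_toFinset.mp (Finset.mem_of_mem_erase hk)
    have hkr : k ≠ r := fun h => hmem (h ▸ hkreq)
    have hb : (fun s => if s = r then g r - 1 else g s) k = g k := by simp [hkr]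
    rw [List.count_cons_of_ne (fun h => hkr h.symm), hb]

theorem pvNeed_cons_miss (g : String → Int) (r : String) (req : List String)
    (hr : r ≠ "?") (hg : g r = 0) :
    pvNeed g (r :: req) = 1 + pvNeed g req := by
  unfold pvNeed
  rw [List.toFinset_cons, Finset.erase_insert_of_ne hr]
  have hcq : List.count "?" (r :: req) = req.count "?" := List.count_cons_of_ne hr
  rw [hcq]
  by_cases hmem : r ∈ req
  · have hrmem : r ∈ req.toFinset.erase "?" :=
      Finset.mem_erase.mpr ⟨hr, List.mem_toFinset.mpr hmem⟩
    have habs : insert r (req.toFinset.erase "?") = req.toFinset.erase "?" :=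
      Finset.insert_eq_self.mpr hrmem
    rw [habs]
    have hsum : ∑ k ∈ req.toFinset.erase "?", max 0 ((List.count k (r :: req) : Int) - g k)
        = ∑ k ∈ req.toFinset.erase "?", ((if k = r then (1:Int) else 0) + max 0 ((req.count k : Int) - g k)) := by
      refine Finset.sum_congr rfl (fun k hk => ?_)
      by_cases hkr : k = r
      · subst hkr
        rw [List.count_cons_self, if_pos rfl, hg]
        push_cast; omega
      · rw [List.count_cons_of_ne (fun h => hkr h.symm), if_neg hkr, zero_add]
    rw [hsum, Finset.sum_add_distrib,
      Finset.sum_ite_eq_of_mem' (req.toFinset.erase "?") r (fun _ => (1:Int)) hrmem]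
    ring
  · have hnot : r ∉ req.toFinset.erase "?" := by
      simp [Finset.mem_erase, List.mem_toFinset, hmem]
    rw [Finset.sum_insert hnot]
    have hc0 : req.count r = 0 := List.count_eq_zero_of_not_mem hmem
    have hterm : max 0 ((List.count r (r :: req) : Int) - g r) = 1 := by
      rw [List.count_cons_self, hc0, hg]
      push_cast; omega
    rw [hterm]
    have hsum : ∑ k ∈ req.toFinset.erase "?", max 0 ((List.count k (r :: req) : Int) - g k)
        = ∑ k ∈ req.toFinset.erase "?", max 0 ((req.count k : Int) - g k) := by
      refine Finset.sum_congr rfl (fun k hk => ?_)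
      have hkreq : k ∈ req := List.mem_toFinset.mp (Finset.mem_of_mem_erase hk)
      have hkr : k ≠ r := fun h => hmem (h ▸ hkreq)
      rw [List.count_cons_of_ne (fun h => hkr h.symm)]
    rw [hsum]; ring

-- the greedy loop of A computes exactly "blanks available ≥ blanks needed"
theorem pvSupplyLoop_eq (req : List String) :
    ∀ d : PySem.Dict String Int, (∀ s, 0 ≤ d.getD s 0) →
      pvSupplyLoop d req = decide (d.getD "?" 0 ≥ pvNeed (fun s => d.getD s 0) req) := by
  induction req with
  | nil =>
    intro d hd
    have : pvNeed (fun s => d.getD s 0) [] = 0 := by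
      unfold pvNeed; simp
    rw [this]
    simp [pvSupplyLoop, hd "?"]
  | cons ch rest ih =>
    intro d hd
    have hS0 : 0 ≤ pvNeed (fun s => d.getD s 0) rest := pvNeed_nonneg _ _
    by_cases hq : ch = "?"
    · subst hq
      rw [pvNeed_cons_blank]
      by_cases h1 : d.getD "?" 0 > 0
      · have hd' : ∀ s, 0 ≤ (d.insert "?" (d.getD "?" 0 - 1)).getD s 0 := by
          intro s
          rw [PySem.Dict.getD_insert]
          split
          · omega
          · exact hd s
        have hgq : (d.insert "?" (d.getD "?" 0 - 1)).getD "?" 0 = d.getD "?" 0 - 1 := by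
          rw [PySem.Dict.getD_insert]; simp
        have hneed : pvNeed (fun s => (d.insert "?" (d.getD "?" 0 - 1)).getD s 0) rest
            = pvNeed (fun s => d.getD s 0) rest := by
          refine pvNeed_congr _ _ _ (fun s hs => ?_)
          rw [PySem.Dict.getD_insert, if_neg (by simpa using hs)]
        rw [pvSupplyLoop, if_pos h1, ih _ hd', hgq, hneed, decide_eq_decide]
        omega
      · rw [pvSupplyLoop, if_neg h1, if_neg h1]
        have : ¬ (d.getD "?" 0 ≥ 1 + pvNeed (fun s => d.getD s 0) rest) := by omega
        simp [this]
    · by_cases h1 : d.getD ch 0 > 0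
      · -- tile available: consume it
        have hd' : ∀ s, 0 ≤ (d.insert ch (d.getD ch 0 - 1)).getD s 0 := by
          intro s
          rw [PySem.Dict.getD_insert]
          split
          · omega
          · exact hd s
        have hgq : (d.insert ch (d.getD ch 0 - 1)).getD "?" 0 = d.getD "?" 0 := by
          rw [PySem.Dict.getD_insert, if_neg (by simpa using Ne.symm hq)]
        have hfun : (fun s => (d.insert ch (d.getD ch 0 - 1)).getD s 0)
            = (fun s => if s = ch then d.getD ch 0 - 1 else d.getD s 0) := by
          funext s
          exact PySem.Dict.getD_insert d ch s _ 0
        rw [pvSupplyLoop, if_pos h1, ih _ hd', hgq, hfun,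
          ← pvNeed_cons_hit (fun s => d.getD s 0) ch rest hq h1]
      · -- no tile: use a blank
        have hch0 : d.getD ch 0 = 0 := le_antisymm (by omega) (hd ch)
        rw [pvNeed_cons_miss (fun s => d.getD s 0) ch rest hq hch0]
        by_cases h2 : d.getD "?" 0 > 0
        · have hd' : ∀ s, 0 ≤ (d.insert "?" (d.getD "?" 0 - 1)).getD s 0 := by
            intro s
            rw [PySem.Dict.getD_insert]
            split
            · omega
            · exact hd s
          have hgq : (d.insert "?" (d.getD "?" 0 - 1)).getD "?" 0 = d.getD "?" 0 - 1 := by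
            rw [PySem.Dict.getD_insert]; simp
          have hneed : pvNeed (fun s => (d.insert "?" (d.getD "?" 0 - 1)).getD s 0) rest
              = pvNeed (fun s => d.getD s 0) rest := by
            refine pvNeed_congr _ _ _ (fun s hs => ?_)
            rw [PySem.Dict.getD_insert, if_neg (by simpa using hs)]
          rw [pvSupplyLoop, if_neg h1, if_pos h2, ih _ hd', hgq, hneed, decide_eq_decide]
          omega
        · rw [pvSupplyLoop, if_neg h1, if_neg h2]
          have : ¬ (d.getD "?" 0 ≥ 1 + pvNeed (fun s => d.getD s 0) rest) := by omega
          simp [this]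

theorem pvAlt_sum (required : List String) (f : String → Int) :
    ((((PySem.Set.ofList required).map (fun k => (k, (required.count k : Int)))).filter
        (fun p => p.1 != "?")).map (fun p => max 0 (p.2 - f p.1))).sum
      = ∑ k ∈ required.toFinset.erase "?", max 0 ((required.count k : Int) - f k) := by
  rw [List.filter_map, List.map_map]
  simp only [Function.comp_def]
  set L := (PySem.Set.ofList required).filter
      (fun k => (k, (required.count k : Int)).1 != "?") with hLdef
  have hnd : L.Nodup := (PySem.Set.nodup_ofList required).filter _
  have htf : L.toFinset = required.toFinset.erase "?" := by
    ext k
    simp only [hLdef, List.mem_toFinset, List.mem_filter, PySem.Set.mem_ofList,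
      Finset.mem_erase, bne_iff_ne]
    tauto
  have hsum := List.sum_toFinset
    (fun k => max 0 ((required.count k : Int) - f k)) hnd
  rw [htf] at hsum
  rw [← hsum]

-- B computes the same "blanks available ≥ blanks needed" comparison
theorem pvAlt_eq (required : List String) (rack : String) :
    can_supply_from_rack_py_alt required rack
      = decide ((PySem.Dict.counter (pvRackKeys rack)).getD "?" 0
          ≥ pvNeed (fun s => (PySem.Dict.counter (pvRackKeys rack)).getD s 0) required) := by
  unfold can_supply_from_rack_py_alt
  simp only [PySem.Dict.items_counter, PySem.Dict.getD_counter]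
  rw [pvAlt_sum required (fun s => ((pvRackKeys rack).count s : Int))]
  unfold pvNeed
  rfl

-- ===== VERDICT (by name: the statement is the Claim_ definition above) =====
theorem can_supply_from_rack_py_spec : Claim_equal_can_supply_from_rack_py := by
  intro required rack _
  unfold Spec_can_supply_from_rack_py can_supply_from_rack_py
  rw [pvAlt_eq]
  exact pvSupplyLoop_eq required _ (fun s => by
    rw [PySem.Dict.getD_counter]; exact Int.natCast_nonneg _)
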